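-- pv_equiv track=rewrite | github.com/hik023/parallel_alg | algorithms.py | create_vert_dict
-- ===== SOURCE A (Python) =====
-- def create_vert_dict(levels_list):
--     level_vertexes = {}
--     for vert, level in enumerate(levels_list):
--         if level_vertexes.get(level) is None:
--             level_vertexes[level] = [vert]
--         else:
--             level_vertexes[level].append(vert)
--     return level_vertexes
-- ===== SOURCE B (Python) =====
-- def create_vert_dict(levels_list):
--     # Outer loop over the distinct levels (first-occurrence order via dict.fromkeys),
--     # inner rescan of enumerate(levels_list) collecting matching positions.
--     return {
--         level: [vert for vert, lv in enumerate(levels_list) if lv == level]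
--         for level in dict.fromkeys(levels_list)
--     }
-- ===== Notes on version B (the rewrite author's own statement) =====
-- stated objective: alternative
-- what changed: Replaces A's single insert-or-append grouping pass over a growing dict with an outer loop over the distinct levels (dict.fromkeys) and, per level, a fresh inner scan of enumerate(levels_list) collecting matching indices.
import Mathlib
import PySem

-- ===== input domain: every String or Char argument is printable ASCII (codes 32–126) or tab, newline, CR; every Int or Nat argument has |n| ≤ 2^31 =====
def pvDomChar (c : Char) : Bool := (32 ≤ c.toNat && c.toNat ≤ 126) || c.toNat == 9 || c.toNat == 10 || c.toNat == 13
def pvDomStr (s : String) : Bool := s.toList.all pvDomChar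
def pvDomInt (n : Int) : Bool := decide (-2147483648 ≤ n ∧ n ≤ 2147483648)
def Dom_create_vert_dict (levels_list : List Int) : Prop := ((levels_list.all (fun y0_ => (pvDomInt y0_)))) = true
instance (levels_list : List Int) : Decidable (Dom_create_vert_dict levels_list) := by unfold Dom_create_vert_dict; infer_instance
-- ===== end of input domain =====

-- B replaces A's single grouping pass with an outer loop over the distinct levels and an inner rescan per level (alternative decomposition, not faster).


-- ===== PORT A =====
-- A: one pass over enumerate(levels_list), inserting [vert] for a new level, appending vert otherwise.
def create_vert_dict (levels_list : List Int) : List (Int × List Int) :=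
  ((PySem.List.enumerate levels_list 0).foldl
    (fun d p =>
      if (d.get? p.2).isNone then d.insert p.2 [p.1]
      else d.modify p.2 [] (fun l => l ++ [p.1]))
    PySem.Dict.empty).items

-- ===== PORT B =====
-- B: distinct levels first (dict.fromkeys order = PySem.List.dedup), then per level a fresh scan of enumerate.
def create_vert_dict_alt (levels_list : List Int) : List (Int × List Int) :=
  (PySem.List.dedup levels_list).map
    (fun k => (k, ((PySem.List.enumerate levels_list 0).filter (fun p => p.2 == k)).map (·.1)))

-- ===== PRECONDITION & SPEC =====
def Spec_create_vert_dict (levels_list : List Int) (out : List (Int × List Int)) : Prop := out = create_vert_dict_alt levels_list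
instance (levels_list : List Int) (out : List (Int × List Int)) : Decidable (Spec_create_vert_dict levels_list out) := by unfold Spec_create_vert_dict; infer_instance

-- ===== CLAIM (what is proved, stated in full; the proofs are below) =====
def Claim_equal_create_vert_dict : Prop := ∀ (levels_list : List Int), Dom_create_vert_dict levels_list → Spec_create_vert_dict levels_list (create_vert_dict levels_list)

-- ===== LEMMAS AND PROOFS =====

-- A's if-branch is exactly Dict.modify: a missing key gets [] appended with [p.1], i.e. insert p.2 [p.1].
theorem create_vert_dict_step_eq (d : PySem.Dict Int (List Int)) (p : Int × Int) :
    (if (d.get? p.2).isNone then d.insert p.2 [p.1] else d.modify p.2 [] (fun l => l ++ [p.1]))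
      = d.modify p.2 [] (fun l => l ++ [p.1]) := by
  by_cases h : d.get? p.2 = none
  · have hg : d.getD p.2 [] = [] := by simp [PySem.Dict.getD_eq_get?_getD, h]
    simp [h, PySem.Dict.modify, hg]
  · simp [Option.isNone_iff_eq_none, h]

theorem create_vert_dict_eq_alt (levels_list : List Int) :
    create_vert_dict levels_list = create_vert_dict_alt levels_list := by
  unfold create_vert_dict
  simp only [create_vert_dict_step_eq]
  set L := PySem.List.enumerate levels_list 0 with hL
  set D := L.foldl (fun d p => d.modify p.2 [] (fun l => l ++ [p.1])) PySem.Dict.empty with hD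
  have hkeys : D.keys = PySem.List.dedup levels_list := by
    rw [hD, PySem.Dict.keys_foldl_modify_key L (fun p : Int × Int => p.2) [] (fun _ p l => l ++ [p.1]) PySem.Dict.empty]
    rw [hL, PySem.List.map_snd_enumerate]
    simp [PySem.Set.update_nil_left, PySem.List.dedup_eq_ofList]
  have hnd : D.keys.Nodup := by rw [hkeys]; exact PySem.List.nodup_dedup _
  have hget : ∀ k, D.getD k [] = (L.filter (fun p => p.2 == k)).map (·.1) := by
    intro k
    have h := PySem.Dict.getD_foldl_modify_append (L.map Prod.swap) PySem.Dict.empty k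
    rw [List.foldl_map] at h
    simpa [List.filter_map, Function.comp] using h
  rw [PySem.Dict.items_eq_map_keys D hnd []]
  rw [hkeys]
  unfold create_vert_dict_alt
  exact List.map_congr_left (fun k _ => by rw [hget k])

-- ===== VERDICT (by name: the statement is the Claim_ definition above) =====
theorem create_vert_dict_spec : Claim_equal_create_vert_dict := by
  intro levels_list _
  unfold Spec_create_vert_dict
  exact create_vert_dict_eq_alt levels_list
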